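-- pv_equiv track=rewrite | github.com/DosImpact/BOJ_PS | mainpy.py | solution
-- ===== SOURCE A (Python) =====
-- def minDist(arr, here, there):
--     return min([abs((0+here) - there), abs((len(arr) + here) - there)])
--
-- def solution(name):
--     check = [0 for _ in range(len(name))]
--     Ans = 0
--
--     for i, n in enumerate(name):
--         if n != 'A':
--             check[i] = 1
--     now = 0
--     if check[now] == 1:
--         check[now] = 0
--         Ans += min([abs(ord(name[now]) - ord('A')),
--                     abs(ord(name[now]) - (ord('Z')+1))])
--
--     if check.count(1) <= 0:
--         return Ans
--
--     while(True):
--         pos1 = check.index(1)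
--         pos2 = (len(check) - 1) - (check[::-1].index(1))
--         nextpos = pos2 if (minDist(check, now, pos1) -
--                            minDist(check, now, pos2)) > 0 else pos1
--         Ans += minDist(check, now, nextpos)
--         now = nextpos
--         Ans += min([abs(ord(name[now]) - ord('A')),
--                     abs(ord(name[now]) - (ord('Z')+1))])
--         check[now] = 0
--         # 바꿔
--         if check.count(1) <= 0:
--             break
--     return (Ans)
-- ===== SOURCE B (Python) =====
-- def solution(name):
--     # The greedy walk always consumes some prefix of the non-'A' positions left to
--     # right and then the remaining positions right to left, and the backward leg's
--     # movement telescopes to (last - p); so one forward scan finding the switch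
--     # point plus that closed form replaces A's step-by-step simulation with rescans.
--     n = len(name)
--     total = sum(min(abs(ord(c) - 65), abs(ord(c) - 91)) for c in name if c != 'A')
--     P = [i for i, c in enumerate(name) if c != 'A' and i > 0]
--     if not P:
--         return total
--     last = P[-1]
--     prev = 0
--     for p in P:
--         d1 = min(p - prev, n - p + prev)
--         d2 = min(last - prev, n - last + prev)
--         if d1 > d2:
--             return total + d2 + (last - p)
--         total += d1
--         prev = p
--     return total
-- ===== Notes on version B (the rewrite author's own statement) =====
-- stated objective: faster
-- what changed: A simulates the greedy walk on a mutable 0/1 marker list, rescanning it (index, reversed index, count) every iteration; B never simulates the walk: it proves the greedy path always takes some prefix of the positions needing a letter change left-to-right followed by the rest right-to-left, finds the switch point in one forward scan, and replaces the whole backward leg by the telescoped closed form last - p.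
import Mathlib
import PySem

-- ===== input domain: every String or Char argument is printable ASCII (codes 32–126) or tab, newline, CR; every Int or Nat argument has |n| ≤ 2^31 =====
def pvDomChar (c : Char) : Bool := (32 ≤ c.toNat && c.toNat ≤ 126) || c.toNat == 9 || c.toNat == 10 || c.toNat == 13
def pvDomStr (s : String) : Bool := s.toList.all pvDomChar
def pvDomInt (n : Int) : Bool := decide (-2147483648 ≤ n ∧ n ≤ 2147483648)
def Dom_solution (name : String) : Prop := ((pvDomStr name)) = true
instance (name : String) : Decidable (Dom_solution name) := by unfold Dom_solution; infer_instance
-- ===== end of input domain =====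

-- B replaces A's quadratic step-by-step greedy simulation (rescanning a 0/1 marker list
-- each iteration) by one forward scan over the positions needing a letter change that finds
-- the greedy path's single switch point, plus a closed form for the backward leg: faster.

-- ===== PORT A =====

-- minDist(arr, here, there)
def minDist (arr : List Int) (here there : Int) : Int :=
  min |(0 + here) - there| |((arr.length : Int) + here) - there|

-- min([abs(ord(name[i]) - ord('A')), abs(ord(name[i]) - (ord('Z')+1))]); every call site
-- indexes in range, so the .getD default is never used
def letterAt (name : String) (i : Int) : Int :=
  let o : Int := (((PySem.List.pyGet? name.toList i).getD 'A').toNat : Int)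
  min |o - 65| |o - 91|

-- the while True loop; fuel = check.count(1) at entry: each pass zeroes one 1 and the loop
-- breaks at count 0, so fuel is exactly the number of iterations (fuel-0 case unreachable)
def solutionLoop (name : String) (fuel : Nat) (check : List Int) (now ans : Int) : Int :=
  match fuel with
  | 0 => ans
  | fuel + 1 =>
    let pos1 : Int := (((PySem.List.index? check 1).getD 0 : Nat) : Int)
    let pos2 : Int := ((check.length : Int) - 1) -
      (((PySem.List.index? ((PySem.List.slice? check none none (-1)).getD []) 1).getD 0 : Nat) : Int)
    let nextpos : Int := if minDist check now pos1 - minDist check now pos2 > 0 then pos2 else pos1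
    let ans1 := ans + minDist check now nextpos
    let now1 := nextpos
    let ans2 := ans1 + letterAt name now1
    let check1 := PySem.List.pySetD check now1 0
    if (PySem.List.count check1 1 : Int) ≤ 0 then ans2
    else solutionLoop name fuel check1 now1 ans2

def solution (name : String) : Int :=
  let cs := name.toList
  -- check = [0 for _ in range(len(name))]; for i, n in enumerate(name): if n != 'A': check[i] = 1
  let check := (PySem.List.enumerate cs 0).foldl
      (fun ch p => if p.2 ≠ 'A' then PySem.List.pySetD ch p.1 1 else ch)
      ((PySem.List.pyRange 0 (cs.length : Int) 1).map (fun _ => (0 : Int)))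
  let now : Int := 0
  -- if check[now] == 1: check[now] = 0; Ans += …   (check[0] raises IndexError iff name = "")
  let ca :=
    if PySem.List.pyGetD check now 0 = 1 then
      (PySem.List.pySetD check now 0, (0 : Int) + letterAt name now)
    else (check, (0 : Int))
  if (PySem.List.count ca.1 1 : Int) ≤ 0 then ca.2
  else solutionLoop name (PySem.List.count ca.1 1) ca.1 now ca.2

-- ===== PORT B =====

-- Source B's 'for p in P' loop with its early return; last and n are fixed over the loop
def bLoop (n last : Int) : List Int → Int → Int → Int
  | [], _, total => total
  | p :: rest, prev, total =>
    let d1 := min (p - prev) (n - p + prev)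
    let d2 := min (last - prev) (n - last + prev)
    if d1 > d2 then total + d2 + (last - p)
    else bLoop n last rest p (total + d1)

def solution_alt (name : String) : Int :=
  let cs := name.toList
  let n : Int := cs.length
  -- total = sum(min(abs(ord(c) - 65), abs(ord(c) - 91)) for c in name if c != 'A')
  let total : Int := ((cs.filter (fun c => decide (c ≠ 'A'))).map
      (fun c => min |((c.toNat : Int)) - 65| |((c.toNat : Int)) - 91|)).sum
  -- P = [i for i, c in enumerate(name) if c != 'A' and i > 0]
  let P : List Int := ((PySem.List.enumerate cs 0).filter
      (fun pr => decide (pr.2 ≠ 'A') && decide (pr.1 > 0))).map (·.1)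
  if P = [] then total
  else
    let last : Int := (PySem.List.pyGet? P (-1)).getD 0   -- last = P[-1]
    bLoop n last P 0 total

-- ===== PRECONDITION & SPEC =====
-- Pre_ excludes only the empty string, on which A's check[0] raises IndexError.
def Pre_solution (name : String) : Prop := name ≠ ""
instance (name : String) : Decidable (Pre_solution name) := by unfold Pre_solution; infer_instance
def pvWitness_solution : String := "BA"

def Spec_solution (name : String) (out : Int) : Prop := out = solution_alt name
instance (name : String) (out : Int) : Decidable (Spec_solution name out) := by unfold Spec_solution; infer_instance

-- ===== CLAIM (what is proved, stated in full; the proofs are below) =====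
def Claim_equal_solution : Prop := ∀ (name : String), Dom_solution name → Pre_solution name → Spec_solution name (solution name)

-- ===== LEMMAS AND PROOFS =====

-- proof-side intermediate: A's loop on the indicator list, re-expressed as a two-ended
-- walk over the sorted list of remaining positions (bridge between the two ports)
def altWalk (n : Int) (fuel : Nat) (P : List Int) (now total : Int) : Int :=
  match fuel, P with
  | _, [] => total
  | 0, _ => total
  | fuel + 1, p :: rest =>
    let q := (p :: rest).getLast (by simp)
    let d1 := min |now - p| |n + now - p|
    let d2 := min |now - q| |n + now - q|
    if d1 > d2 then altWalk n fuel (p :: rest).dropLast q (total + d2)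
    else altWalk n fuel rest p (total + d1)

-- per-character letter-change cost
def letterC (c : Char) : Int := min |(c.toNat : Int) - 65| |(c.toNat : Int) - 91|

-- the 0/1 indicator list of length n of a set S of positions
def maskL (n : Nat) (S : List Int) : List Int :=
  (List.range n).map (fun (t : Nat) => if (t : Int) ∈ S then 1 else 0)

theorem length_maskL (n : Nat) (S : List Int) : (maskL n S).length = n := by
  simp [maskL]

theorem getElem_maskL (n : Nat) (S : List Int) (t : Nat) (h : t < n) :
    (maskL n S)[t]'(by simp [maskL]; omega) = if (t : Int) ∈ S then 1 else 0 := by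
  unfold maskL
  rw [List.getElem_map, List.getElem_range]

theorem index?_maskL (n : Nat) (S : List Int) (p : Int) (hp : p ∈ S)
    (hmin : ∀ t ∈ S, p ≤ t) (hb : ∀ t ∈ S, 0 ≤ t ∧ t < (n : Int)) :
    PySem.List.index? (maskL n S) 1 = some p.toNat := by
  have hp0 : 0 ≤ p := (hb p hp).1
  have hpn : p < (n : Int) := (hb p hp).2
  have hmn : p.toNat < n := by omega
  rw [PySem.List.index?_eq_some_iff]
  have hmem1 : (p.toNat : Int) ∈ S := by
    rw [show ((p.toNat : Nat) : Int) = p by omega]; exact hp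
  refine ⟨(maskL n S).take p.toNat, (maskL n S).drop (p.toNat + 1), ?_, ?_, ?_⟩
  · conv_lhs => rw [← List.take_append_drop p.toNat (maskL n S)]
    rw [← List.getElem_cons_drop (as := maskL n S) (i := p.toNat)
      (h := by rw [length_maskL]; omega)]
    rw [getElem_maskL n S p.toNat hmn, if_pos hmem1]
  · rw [List.length_take, length_maskL]; omega
  · intro hmem
    rw [List.mem_iff_getElem] at hmem
    obtain ⟨j, hj, hjx⟩ := hmem
    have hjm : j < p.toNat := by
      have := hj; rw [List.length_take, length_maskL] at this; omega
    rw [List.getElem_take, getElem_maskL n S j (by omega)] at hjx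
    by_cases hjs : (j : Int) ∈ S
    · have := hmin _ hjs; omega
    · rw [if_neg hjs] at hjx; norm_num at hjx

theorem reverse_maskL (n : Nat) (S : List Int) (hb : ∀ t ∈ S, 0 ≤ t ∧ t < (n : Int)) :
    (maskL n S).reverse = maskL n (S.map (fun t => (n : Int) - 1 - t)) := by
  apply List.ext_getElem (by simp [length_maskL])
  intro i h1 h2
  have hi : i < n := by simpa [length_maskL] using h2
  rw [List.getElem_reverse]
  rw [getElem_maskL n S ((maskL n S).length - 1 - i) (by rw [length_maskL]; omega),
    getElem_maskL n _ i hi, length_maskL]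
  have hiff : ((n - 1 - i : Nat) : Int) ∈ S ↔ (i : Int) ∈ S.map (fun t => (n : Int) - 1 - t) := by
    rw [List.mem_map]
    constructor
    · intro hmem
      exact ⟨_, hmem, by omega⟩
    · rintro ⟨t, ht, hft⟩
      have hbt := hb t ht
      have : ((n - 1 - i : Nat) : Int) = t := by omega
      rwa [this]
  rw [if_congr hiff rfl rfl]

theorem set_maskL (n : Nat) (S S' : List Int) (p : Int) (hp : 0 ≤ p) (_hpn : p < (n : Int))
    (hmem : ∀ t : Int, t ∈ S' ↔ t ∈ S ∧ t ≠ p) :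
    (maskL n S).set p.toNat 0 = maskL n S' := by
  apply List.ext_getElem (by simp [length_maskL])
  intro i h1 h2
  have hi : i < n := by simpa [length_maskL] using h2
  rw [List.getElem_set, getElem_maskL n S' i hi]
  by_cases hip : p.toNat = i
  · subst hip
    have hpi : ((p.toNat : Nat) : Int) = p := by omega
    rw [if_pos rfl, if_neg]
    intro hc
    rw [hpi] at hc
    exact ((hmem p).1 hc).2 rfl
  · rw [if_neg hip, getElem_maskL n S i hi]
    have hne : (i : Int) ≠ p := by omega
    have : (i : Int) ∈ S ↔ (i : Int) ∈ S' := by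
      rw [hmem]
      exact ⟨fun h => ⟨h, hne⟩, fun h => h.1⟩
    rw [if_congr this rfl rfl]

theorem count_maskL (n : Nat) (S : List Int) (hnd : S.Nodup)
    (hb : ∀ t ∈ S, 0 ≤ t ∧ t < (n : Int)) :
    PySem.List.count (maskL n S) 1 = S.length := by
  induction S with
  | nil =>
    rw [PySem.List.count_eq]
    simp only [List.length_nil]
    rw [List.count_eq_zero]
    intro hmem
    simp [maskL] at hmem
  | cons p rest ih =>
    have hp0 : 0 ≤ p := (hb p (by simp)).1
    have hpn : p < (n : Int) := (hb p (by simp)).2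
    have hpr : p ∉ rest := (List.nodup_cons.1 hnd).1
    have hlen : p.toNat < (maskL n rest).length := by rw [length_maskL]; omega
    have hkey : maskL n (p :: rest) = (maskL n rest).set p.toNat 1 := by
      apply List.ext_getElem (by simp [length_maskL])
      intro i h1 h2
      have hi : i < n := by simpa [length_maskL] using h1
      rw [getElem_maskL n _ i hi, List.getElem_set]
      by_cases hip : p.toNat = i
      · subst hip
        have hpi : ((p.toNat : Nat) : Int) = p := by omega
        rw [if_pos rfl, if_pos (by rw [hpi]; simp)]
      · rw [if_neg hip, getElem_maskL n rest i hi]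
        have hne : (i : Int) ≠ p := by omega
        have : (i : Int) ∈ p :: rest ↔ (i : Int) ∈ rest := by
          simp [List.mem_cons, hne]
        rw [if_congr this rfl rfl]
    have h0 : (maskL n rest)[p.toNat] = 0 := by
      rw [getElem_maskL n rest p.toNat (by omega), if_neg]
      intro hc
      rw [show ((p.toNat : Nat) : Int) = p by omega] at hc
      exact hpr hc
    have hdec : maskL n rest
        = (maskL n rest).take p.toNat ++ (maskL n rest)[p.toNat] :: (maskL n rest).drop (p.toNat + 1) := by
      conv_lhs => rw [← List.take_append_drop p.toNat (maskL n rest)]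
      rw [List.getElem_cons_drop]
    have ihr := ih (List.nodup_cons.1 hnd).2 (fun t ht => hb t (by simp [ht]))
    rw [PySem.List.count_eq] at ihr
    nth_rewrite 1 [hdec] at ihr
    rw [hkey, PySem.List.count_eq, List.set_eq_take_cons_drop _ hlen]
    rw [h0] at ihr
    simp [List.count_append] at ihr ⊢
    omega

theorem getLast_max (S : List Int) (h : S.Pairwise (· < ·)) (hne : S ≠ []) :
    ∀ t ∈ S, t ≤ S.getLast hne := by
  intro t ht
  have hd := List.dropLast_append_getLast hne
  have h' : (S.dropLast ++ [S.getLast hne]).Pairwise (· < ·) := by rw [hd]; exact h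
  have ht' : t ∈ S.dropLast ++ [S.getLast hne] := by rw [hd]; exact ht
  rw [List.pairwise_append] at h'
  rcases List.mem_append.1 ht' with h1 | h2
  · exact le_of_lt (h'.2.2 t h1 (S.getLast hne) (List.mem_singleton_self _))
  · rw [List.mem_singleton] at h2; omega

theorem mem_dropLast_iff (S : List Int) (h : S.Pairwise (· < ·)) (hne : S ≠ []) (t : Int) :
    t ∈ S.dropLast ↔ t ∈ S ∧ t ≠ S.getLast hne := by
  have hd := List.dropLast_append_getLast hne
  have h' : (S.dropLast ++ [S.getLast hne]).Pairwise (· < ·) := by rw [hd]; exact h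
  rw [List.pairwise_append] at h'
  constructor
  · intro h1
    refine ⟨by rw [← hd]; exact List.mem_append_left _ h1, ?_⟩
    have := h'.2.2 t h1 (S.getLast hne) (List.mem_singleton_self _)
    omega
  · rintro ⟨hmem, hne'⟩
    rw [← hd] at hmem
    rcases List.mem_append.1 hmem with h1 | h2
    · exact h1
    · rw [List.mem_singleton] at h2; exact absurd h2 hne'

theorem mem_tail_iff (p : Int) (rest : List Int) (h : (p :: rest).Pairwise (· < ·)) (t : Int) :
    t ∈ rest ↔ t ∈ p :: rest ∧ t ≠ p := by
  rw [List.pairwise_cons] at h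
  constructor
  · intro h1
    exact ⟨List.mem_cons_of_mem _ h1, by have := h.1 t h1; omega⟩
  · rintro ⟨hmem, hne'⟩
    rcases List.mem_cons.1 hmem with h1 | h2
    · exact absurd h1 hne'
    · exact h2

theorem altWalk_nil (n : Int) (fuel : Nat) (now total : Int) :
    altWalk n fuel [] now total = total := by
  cases fuel <;> rfl

-- the central loop correspondence: A's scan-based loop on the indicator list equals the
-- two-ended walk on the sorted position list, with the letter costs pre-summed
theorem loop_eq (name : String) (n : Nat) :
    ∀ (k : Nat) (S : List Int) (now ans : Int), S.length = k → S ≠ [] →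
      S.Pairwise (· < ·) → (∀ t ∈ S, 0 ≤ t ∧ t < (n : Int)) →
      solutionLoop name k (maskL n S) now ans
        = altWalk (n : Int) k S now (ans + (S.map (letterAt name)).sum) := by
  intro k
  induction k using Nat.strong_induction_on with
  | _ k ih =>
  intro S now ans hk hne hpw hb
  rcases S with _ | ⟨p, rest⟩
  · exact absurd rfl hne
  subst hk
  have hcons : (p :: rest) ≠ [] := List.cons_ne_nil _ _
  have hqmem : (p :: rest).getLast hcons ∈ p :: rest := List.getLast_mem hcons
  have hpb := hb p (List.mem_cons_self ..)
  have hqb := hb _ hqmem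
  have hmin : ∀ t ∈ p :: rest, p ≤ t := by
    intro t ht
    rcases List.mem_cons.1 ht with h1 | h2
    · omega
    · have := (List.pairwise_cons.1 hpw).1 t h2; omega
  have hmax : ∀ t ∈ p :: rest, t ≤ (p :: rest).getLast hcons := getLast_max _ hpw hcons
  have hpos1 : PySem.List.index? (maskL n (p :: rest)) 1 = some p.toNat :=
    index?_maskL n _ p (List.mem_cons_self ..) hmin hb
  have hrev : (maskL n (p :: rest)).reverse
      = maskL n ((p :: rest).map (fun t => (n : Int) - 1 - t)) := reverse_maskL n _ hb
  have hpos2 : PySem.List.index? (maskL n ((p :: rest).map (fun t => (n : Int) - 1 - t))) 1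
      = some ((n : Int) - 1 - (p :: rest).getLast hcons).toNat := by
    apply index?_maskL
    · exact List.mem_map.2 ⟨_, hqmem, rfl⟩
    · intro t ht
      rcases List.mem_map.1 ht with ⟨s, hs, hfs⟩
      have := hmax s hs; omega
    · intro t ht
      rcases List.mem_map.1 ht with ⟨s, hs, hfs⟩
      have := hb s hs; omega
  rw [solutionLoop.eq_def, altWalk.eq_def]
  simp only [length_maskL, PySem.List.slice?_none_none_neg_one, Option.getD_some, hrev,
    hpos1, hpos2, minDist, zero_add, List.length_cons]
  rw [Int.toNat_of_nonneg hpb.1,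
    Int.toNat_of_nonneg (show (0:Int) ≤ (n:Int) - 1 - (p :: rest).getLast hcons by omega),
    show (n:Int) - 1 - ((n:Int) - 1 - (p :: rest).getLast hcons) = (p :: rest).getLast hcons
      by ring]
  simp only [gt_iff_lt, sub_pos]
  have hsumq : (List.map (letterAt name) (p :: rest)).sum
      = (List.map (letterAt name) (p :: rest).dropLast).sum
        + letterAt name ((p :: rest).getLast hcons) := by
    conv_lhs => rw [← List.dropLast_append_getLast hcons]
    simp
  have hldl : (p :: rest).dropLast.length = rest.length := by simp
  by_cases hc : min |now - (p :: rest).getLast hcons| |(n : Int) + now - (p :: rest).getLast hcons|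
      < min |now - p| |(n : Int) + now - p|
  · simp only [if_pos hc]
    rw [PySem.List.pySetD_of_nonneg _ _ hqb.1,
      set_maskL n (p :: rest) (p :: rest).dropLast _ hqb.1 hqb.2
        (fun t => mem_dropLast_iff _ hpw hcons t)]
    have hpwdl : (p :: rest).dropLast.Pairwise (· < ·) :=
      hpw.sublist (List.dropLast_sublist _)
    have hbdl : ∀ t ∈ (p :: rest).dropLast, 0 ≤ t ∧ t < (n : Int) :=
      fun t ht => hb t ((List.dropLast_sublist _).subset ht)
    rw [count_maskL n _ (hpwdl.imp (fun h => ne_of_lt h)) hbdl, hldl]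
    by_cases hr0 : rest.length = 0
    · rw [if_pos (show ((rest.length : Nat) : Int) ≤ 0 by omega)]
      have hdl : (p :: rest).dropLast = [] := by
        rw [← List.length_eq_zero_iff, hldl]; exact hr0
      rw [hdl, altWalk_nil, hsumq, hdl]
      simp
      ring
    · rw [if_neg (show ¬(((rest.length : Nat) : Int) ≤ 0) by omega)]
      have hdlne : (p :: rest).dropLast ≠ [] := by
        rw [← List.length_pos_iff, hldl]; omega
      rw [ih rest.length (by simp) _ _ _ hldl hdlne hpwdl hbdl]
      congr 1
      rw [hsumq]
      ring
  · simp only [if_neg hc]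
    rw [PySem.List.pySetD_of_nonneg _ _ hpb.1,
      set_maskL n (p :: rest) rest p hpb.1 hpb.2 (fun t => mem_tail_iff p rest hpw t)]
    have hpwr : rest.Pairwise (· < ·) := (List.pairwise_cons.1 hpw).2
    have hbr : ∀ t ∈ rest, 0 ≤ t ∧ t < (n : Int) :=
      fun t ht => hb t (List.mem_cons_of_mem _ ht)
    rw [count_maskL n rest (hpwr.imp (fun h => ne_of_lt h)) hbr]
    by_cases hr0 : rest.length = 0
    · have hrnil : rest = [] := by rw [← List.length_eq_zero_iff]; exact hr0
      subst hrnil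
      rw [if_pos (by omega), altWalk_nil]
      simp
      ring
    · rw [if_neg (show ¬(((rest.length : Nat) : Int) ≤ 0) by omega)]
      have hrne : rest ≠ [] := by rw [← List.length_pos_iff]; omega
      rw [ih rest.length (by simp) rest p _ rfl hrne hpwr hbr]
      congr 1
      simp
      ring

-- after the walk has jumped to the rightmost position, everything remaining is to its left
-- and the walk's cost telescopes: total + (now - leftmost)
theorem walk_desc (n : Int) (hn : 0 ≤ n) :
    ∀ (fuel : Nat) (P : List Int) (now total : Int) (hne : P ≠ []),
      P.length = fuel → P.Pairwise (· < ·) → (∀ t ∈ P, t < now) →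
      altWalk n fuel P now total = total + (now - P.head hne) := by
  intro fuel
  induction fuel using Nat.strong_induction_on with
  | _ fuel ih =>
  intro P now total hne hk hpw hlt
  rcases P with _ | ⟨p, rest⟩
  · exact absurd rfl hne
  subst hk
  have hcons : (p :: rest) ≠ [] := List.cons_ne_nil _ _
  have hq := List.getLast_mem hcons
  have hpq : p ≤ (p :: rest).getLast hcons := getLast_max _ hpw hcons p (List.mem_cons_self ..)
  have hpn : p < now := hlt p (List.mem_cons_self ..)
  have hqn : (p :: rest).getLast hcons < now := hlt _ hq
  rw [altWalk.eq_def]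
  simp only [List.length_cons]
  rw [show |now - p| = now - p from abs_of_pos (by omega),
    show |n + now - p| = n + now - p from abs_of_pos (by omega),
    show |now - (p :: rest).getLast hcons| = now - (p :: rest).getLast hcons
      from abs_of_pos (by omega),
    show |n + now - (p :: rest).getLast hcons| = n + now - (p :: rest).getLast hcons
      from abs_of_pos (by omega),
    min_eq_left (show now - p ≤ n + now - p by omega),
    min_eq_left (show now - (p :: rest).getLast hcons
      ≤ n + now - (p :: rest).getLast hcons by omega)]
  rcases rest with _ | ⟨r, rs⟩
  · rw [if_neg (by simp), altWalk_nil]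
    simp
  · have hrne : (r :: rs) ≠ [] := List.cons_ne_nil _ _
    have hql : (p :: r :: rs).getLast hcons = (r :: rs).getLast hrne := List.getLast_cons hrne
    have hplt : p < (p :: r :: rs).getLast hcons := by
      rw [hql]
      exact (List.pairwise_cons.1 hpw).1 _ (List.getLast_mem hrne)
    rw [if_pos (by omega)]
    have hdl : (p :: r :: rs).dropLast = p :: (r :: rs).dropLast := rfl
    have hdlne : (p :: r :: rs).dropLast ≠ [] := by rw [hdl]; exact List.cons_ne_nil _ _
    have hdll : (p :: r :: rs).dropLast.length = (r :: rs).length := by simp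
    rw [ih (r :: rs).length (by simp) _ _ _ hdlne hdll
      (hpw.sublist (List.dropLast_sublist _))
      (fun t ht => by
        have := (mem_dropLast_iff _ hpw hcons t).1 ht
        have h1 := getLast_max _ hpw hcons t this.1
        omega)]
    rw [show (p :: r :: rs).dropLast.head hdlne = p from rfl]
    simp only [List.head_cons]
    omega

-- the walk from below all remaining positions equals Source B's forward scan:
-- left steps agree and the first right jump collapses by walk_desc
theorem walk_eq (n : Int) :
    ∀ (fuel : Nat) (P : List Int) (prev total : Int) (hne : P ≠ []),
      P.length = fuel → P.Pairwise (· < ·) → 0 ≤ prev →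
      (∀ t ∈ P, prev < t ∧ t < n) →
      altWalk n fuel P prev total = bLoop n (P.getLast hne) P prev total := by
  intro fuel
  induction fuel with
  | zero => intro P prev total hne hk; rw [List.length_eq_zero_iff] at hk; exact absurd hk hne
  | succ fuel ih =>
  intro P prev total hne hk hpw hprev hb
  rcases P with _ | ⟨p, rest⟩
  · exact absurd rfl hne
  have hcons : (p :: rest) ≠ [] := List.cons_ne_nil _ _
  have hpb := hb p (List.mem_cons_self ..)
  have hqb := hb _ (List.getLast_mem hcons)
  have hn : 0 ≤ n := by omega
  rw [altWalk.eq_def, bLoop.eq_def]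
  simp only [List.length_cons]
  rw [show |prev - p| = p - prev from by rw [abs_sub_comm]; exact abs_of_pos (by omega),
    show |n + prev - p| = n - p + prev from by rw [abs_of_pos (by omega)]; ring,
    show |prev - (p :: rest).getLast hcons| = (p :: rest).getLast hcons - prev
      from by rw [abs_sub_comm]; exact abs_of_pos (by omega),
    show |n + prev - (p :: rest).getLast hcons| = n - (p :: rest).getLast hcons + prev
      from by rw [abs_of_pos (by omega)]; ring]
  rcases rest with _ | ⟨r, rs⟩
  · simp only [List.getLast_singleton]
    rw [if_neg (by omega), altWalk_nil, if_neg (by omega)]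
    rfl
  · have hrne : (r :: rs) ≠ [] := List.cons_ne_nil _ _
    have hql : (p :: r :: rs).getLast hcons = (r :: rs).getLast hrne := List.getLast_cons hrne
    have hrk : (r :: rs).length = fuel := by simpa using hk
    by_cases hc : min ((p :: r :: rs).getLast hcons - prev)
        ((n : Int) - (p :: r :: rs).getLast hcons + prev)
        < min (p - prev) (n - p + prev)
    · rw [if_pos hc, if_pos hc]
      have hdl : (p :: r :: rs).dropLast = p :: (r :: rs).dropLast := rfl
      have hdlne : (p :: r :: rs).dropLast ≠ [] := by rw [hdl]; exact List.cons_ne_nil _ _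
      have hdll : (p :: r :: rs).dropLast.length = (r :: rs).length := by simp
      rw [walk_desc n hn fuel _ _ _ hdlne (hdll.trans hrk)
        (hpw.sublist (List.dropLast_sublist _))
        (fun t ht => by
          have hm := (mem_dropLast_iff _ hpw hcons t).1 ht
          have h1 := getLast_max _ hpw hcons t hm.1
          omega)]
      rw [show (p :: r :: rs).dropLast.head hdlne = p from rfl]
    · rw [if_neg hc, if_neg hc]
      rw [ih (r :: rs) p _ hrne hrk (List.pairwise_cons.1 hpw).2 (by omega)
        (fun t ht => ⟨(List.pairwise_cons.1 hpw).1 t ht, (hb t (List.mem_cons_of_mem _ ht)).2⟩)]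
      rw [hql]

theorem set_append_length {α : Type} (pre : List α) (x v : α) (suf : List α) :
    (pre ++ x :: suf).set pre.length v = pre ++ v :: suf := by
  induction pre with
  | nil => rfl
  | cons a pre ih => simp [ih]

theorem zeros_eq (m : Nat) :
    (PySem.List.pyRange 0 (m : Int) 1).map (fun _ => (0 : Int)) = List.replicate m 0 := by
  rw [PySem.List.pyRange_zero_natCast, List.map_map]
  rw [List.eq_replicate_iff]
  constructor
  · simp
  · intro x hx
    rcases List.mem_map.1 hx with ⟨_, _, hb⟩
    exact hb.symm

-- A's check-building loop writes the indicator of the non-'A' positions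
theorem foldA (cs : List Char) : ∀ (pre : List Int),
    (PySem.List.enumerate cs (pre.length : Int)).foldl
      (fun ch p => if p.2 ≠ 'A' then PySem.List.pySetD ch p.1 1 else ch)
      (pre ++ List.replicate cs.length 0)
    = pre ++ cs.map (fun c => if c ≠ 'A' then (1 : Int) else 0) := by
  induction cs with
  | nil => intro pre; simp
  | cons c cs ih =>
    intro pre
    rw [PySem.List.enumerate_cons, List.foldl_cons, List.length_cons, List.replicate_succ]
    by_cases hc : c = 'A'
    · subst hc
      rw [if_neg (by simp)]
      rw [show pre ++ (0 : Int) :: List.replicate cs.length 0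
          = (pre ++ [(0 : Int)]) ++ List.replicate cs.length 0 by simp]
      rw [show ((pre.length : Nat) : Int) + 1 = (((pre ++ [(0 : Int)]).length : Nat) : Int)
          by simp]
      rw [ih (pre ++ [0])]
      simp
    · rw [if_pos (by simp [hc])]
      rw [PySem.List.pySetD_natCast, set_append_length]
      rw [show pre ++ (1 : Int) :: List.replicate cs.length 0
          = (pre ++ [(1 : Int)]) ++ List.replicate cs.length 0 by simp]
      rw [show ((pre.length : Nat) : Int) + 1 = (((pre ++ [(1 : Int)]).length : Nat) : Int)
          by simp]
      rw [ih (pre ++ [1])]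
      simp [hc]

theorem main_eq (name : String) (h : name ≠ "") : solution name = solution_alt name := by
  obtain ⟨c0, rest, hcs⟩ : ∃ c0 rest, name.toList = c0 :: rest := by
    cases hl : name.toList with
    | nil => exact absurd (String.toList_eq_nil_iff.mp hl) h
    | cons a l => exact ⟨a, l, rfl⟩
  simp only [solution, solution_alt, hcs]
  rw [zeros_eq]
  have hA := foldA (c0 :: rest) []
  simp only [List.length_nil, Nat.cast_zero, List.nil_append] at hA
  rw [hA, List.map_cons, PySem.List.pyGetD_zero_cons]
  have hPfil : (((0 : Int), c0) :: PySem.List.enumerate rest (0 + 1)).filter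
      (fun pr => decide (pr.2 ≠ 'A') && decide (pr.1 > 0))
      = (PySem.List.enumerate rest 1).filter (fun pr => decide (pr.2 ≠ 'A')) := by
    rw [List.filter_cons]
    rw [show (decide (((0 : Int), c0).2 ≠ 'A') && decide (((0 : Int), c0).1 > 0)) = false
      by simp]
    rw [if_neg (by simp), show ((0 : Int) + 1) = 1 by norm_num]
    exact List.filter_congr (fun pr hpr => by
      rcases (PySem.List.mem_enumerate_iff rest 1 pr).1 hpr with ⟨k, hk, rfl⟩
      have hpos : ((1 + (k : Int), rest[k]).1 > 0) := by
        show (0 : Int) < 1 + (k : Int); omega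
      simp [hpos])
  rw [PySem.List.enumerate_cons, hPfil]
  set P : List Int := ((PySem.List.enumerate rest 1).filter
    (fun pr => decide (pr.2 ≠ 'A'))).map (fun x => x.1) with hPdef
  have hmemP : ∀ x : Int, x ∈ P ↔ ∃ k : Nat, ∃ hk : k < rest.length,
      x = 1 + (k : Int) ∧ rest[k] ≠ 'A' := by
    intro x
    rw [hPdef]
    constructor
    · intro hx
      rcases List.mem_map.1 hx with ⟨pr, hpr, rfl⟩
      rcases List.mem_filter.1 hpr with ⟨hprE, hprq⟩
      rcases (PySem.List.mem_enumerate_iff rest 1 pr).1 hprE with ⟨k, hk, rfl⟩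
      exact ⟨k, hk, rfl, by simpa using hprq⟩
    · rintro ⟨k, hk, rfl, hne⟩
      exact List.mem_map.2 ⟨(1 + (k : Int), rest[k]),
        List.mem_filter.2 ⟨(PySem.List.mem_enumerate_iff rest 1 _).2 ⟨k, hk, rfl⟩,
          by simpa using hne⟩, rfl⟩
  have hPpw : P.Pairwise (· < ·) := by
    rw [hPdef]
    exact List.pairwise_map.2
      ((PySem.List.pairwise_lt_enumerate rest 1).sublist (List.filter_sublist ..))
  have hPb : ∀ t ∈ P, 0 ≤ t ∧ t < ((rest.length + 1 : Nat) : Int) := by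
    intro t ht
    rcases (hmemP t).1 ht with ⟨k, hk, rfl, _⟩
    constructor
    · omega
    · push_cast; omega
  have hPb' : ∀ t ∈ P, (0 : Int) < t ∧ t < ((c0 :: rest).length : Int) := by
    intro t ht
    rcases (hmemP t).1 ht with ⟨k, hk, rfl, _⟩
    constructor
    · omega
    · simp only [List.length_cons]; push_cast; omega
  have hmask : (0 : Int) :: List.map (fun c => if c ≠ 'A' then (1 : Int) else 0) rest
      = maskL (rest.length + 1) P := by
    apply List.ext_getElem (by simp [length_maskL])
    intro i h1 h2
    have hi : i < rest.length + 1 := by simpa using h1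
    rw [getElem_maskL _ _ i hi]
    cases i with
    | zero =>
      rw [List.getElem_cons_zero, if_neg]
      intro hx
      rcases (hmemP _).1 hx with ⟨k, hk, hkeq, _⟩
      omega
    | succ j =>
      have hj : j < rest.length := by omega
      simp only [List.getElem_cons_succ, List.getElem_map]
      by_cases hcj : rest[j] = 'A'
      · rw [if_neg (by simp [hcj]), if_neg]
        intro hx
        rcases (hmemP _).1 hx with ⟨k, hk, hkeq, hne⟩
        have hkj : k = j := by omega
        subst hkj
        exact hne hcj
      · rw [if_pos (by simp [hcj]), if_pos]
        exact (hmemP _).2 ⟨j, hj, by omega, hcj⟩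
  have hPnd : P.Nodup := hPpw.imp (fun hlt => ne_of_lt hlt)
  have hFsnd : ((PySem.List.enumerate rest 1).filter
        (fun pr => decide (pr.2 ≠ 'A'))).map (fun x => x.2)
      = rest.filter (fun c => decide (c ≠ 'A')) := by
    conv_rhs => rw [← PySem.List.map_snd_enumerate rest 1, List.filter_map]
    exact congrArg _ (List.filter_congr (fun pr _ => rfl))
  have hsumP : (List.map (letterAt name) P).sum
      = (List.map letterC (rest.filter (fun c => decide (c ≠ 'A')))).sum := by
    rw [hPdef, List.map_map]
    rw [List.map_congr_left (g := fun pr : Int × Char => letterC pr.2)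
      (fun pr hpr => by
        rcases List.mem_filter.1 hpr with ⟨hprE, _⟩
        rcases (PySem.List.mem_enumerate_iff rest 1 pr).1 hprE with ⟨k, hk, rfl⟩
        show letterAt name (1 + (k : Int)) = letterC rest[k]
        unfold letterAt letterC
        rw [hcs, show (1 + (k : Int)) = ((k + 1 : Nat) : Int) by push_cast; ring,
          PySem.List.pyGet?_natCast]
        simp [List.getElem?_cons_succ, List.getElem?_eq_getElem hk])]
    rw [show ((PySem.List.enumerate rest 1).filter
          (fun pr => decide (pr.2 ≠ 'A'))).map (fun pr : Int × Char => letterC pr.2)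
        = (((PySem.List.enumerate rest 1).filter
          (fun pr => decide (pr.2 ≠ 'A'))).map (fun x => x.2)).map letterC
        by rw [List.map_map]; rfl]
    rw [hFsnd]
  have hlet0 : letterAt name 0 = letterC c0 := by
    unfold letterAt letterC
    rw [hcs]
    simp
  have hBtot : (((c0 :: rest).filter (fun c => decide (c ≠ 'A'))).map
        (fun c => min |((c.toNat : Int)) - 65| |((c.toNat : Int)) - 91|)).sum
      = (if c0 ≠ 'A' then letterC c0 else 0)
        + (List.map letterC (rest.filter (fun c => decide (c ≠ 'A')))).sum := by
    rw [List.filter_cons]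
    by_cases hc0 : c0 = 'A'
    · rw [if_neg (by simp [hc0]), if_neg (by simp [hc0]), zero_add]
      rfl
    · rw [if_pos (by simp [hc0]), if_pos (by simp [hc0]), List.map_cons, List.sum_cons]
      rfl
  -- the branch on whether P is empty, and the B-side last = getLast
  by_cases hP0 : P = []
  · -- no positions past 0 need typing: the B side returns total, the A side stops early
    rw [if_pos hP0]
    have hfil : rest.filter (fun c => decide (c ≠ 'A')) = [] := by
      rw [← hFsnd, List.map_eq_nil_iff.mp hP0]
      rfl
    rw [hBtot, hfil]
    by_cases hc0 : c0 = 'A'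
    · subst hc0
      rw [show (if ('A' : Char) ≠ 'A' then (1 : Int) else 0) = 0 from by simp]
      rw [if_neg (show ¬((0 : Int) = 1) by norm_num)]
      dsimp only
      rw [hmask, count_maskL _ P hPnd hPb, hP0]
      simp
    · rw [show (if c0 ≠ 'A' then (1 : Int) else 0) = 1 from by simp [hc0]]
      rw [if_pos rfl]
      dsimp only
      rw [PySem.List.pySetD_of_nonneg _ _ (le_refl (0 : Int))]
      rw [show ((0 : Int).toNat) = 0 from rfl, List.set_cons_zero]
      rw [hmask, count_maskL _ P hPnd hPb, hP0]
      simp [hc0, hlet0]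
  · rw [if_neg hP0]
    have hlast : (PySem.List.pyGet? P (-1)).getD 0 = P.getLast hP0 := by
      rw [PySem.List.pyGet?_neg_one, List.getLast?_eq_some_getLast hP0]
      rfl
    rw [hlast, hBtot]
    have hPlen1 : 1 ≤ P.length := by
      rcases P with _ | _
      · exact absurd rfl hP0
      · simp
    have hwalk : ∀ ans : Int, solutionLoop name P.length (maskL (rest.length + 1) P) 0 ans
        = bLoop ((c0 :: rest).length : Int) (P.getLast hP0) P 0
            (ans + (List.map letterC (rest.filter (fun c => decide (c ≠ 'A')))).sum) := by
      intro ans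
      rw [loop_eq name (rest.length + 1) P.length P 0 ans rfl hP0 hPpw hPb]
      rw [show (((rest.length + 1 : Nat)) : Int) = ((c0 :: rest).length : Int) by simp]
      rw [walk_eq ((c0 :: rest).length : Int) P.length P 0
        (ans + (List.map (letterAt name) P).sum) hP0 rfl hPpw (le_refl 0) hPb']
      rw [hsumP]
    by_cases hc0 : c0 = 'A'
    · subst hc0
      rw [show (if ('A' : Char) ≠ 'A' then (1 : Int) else 0) = 0 from by simp]
      rw [if_neg (show ¬((0 : Int) = 1) by norm_num)]
      dsimp only
      rw [hmask, count_maskL _ P hPnd hPb]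
      rw [if_neg (show ¬((P.length : Int) ≤ 0) by omega)]
      rw [hwalk 0, show (if ('A' : Char) ≠ 'A' then letterC 'A' else 0) = 0 from by simp]
    · rw [show (if c0 ≠ 'A' then (1 : Int) else 0) = 1 from by simp [hc0]]
      rw [if_pos rfl]
      dsimp only
      rw [PySem.List.pySetD_of_nonneg _ _ (le_refl (0 : Int))]
      rw [show ((0 : Int).toNat) = 0 from rfl, List.set_cons_zero]
      rw [hmask, count_maskL _ P hPnd hPb]
      rw [if_neg (show ¬((P.length : Int) ≤ 0) by omega)]
      rw [hwalk (0 + letterAt name 0), hlet0]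
      rw [show (if c0 ≠ 'A' then letterC c0 else 0) = letterC c0 from by simp [hc0]]
      ring_nf

-- ===== VERDICT (by name: the statement is the Claim_ definition above) =====
theorem solution_spec : Claim_equal_solution := by
  intro name _ hpre
  unfold Spec_solution
  exact main_eq name hpre
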